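-- pv_equiv track=rewrite | github.com/lukasabbe/AOC | day9/day9_part2.py | findBiggestChunk
-- ===== SOURCE A (Python) =====
-- def findBiggestChunk(numData:list, findChunk:str):
--     indexStart = 0
--     indexStop = 0
--     foundStart = False
--     for i in range(len(numData)):
--         if(numData[i] == findChunk and not foundStart):
--             indexStart = i
--             foundStart = True
--         if(numData[i] != findChunk and foundStart):
--             indexStop = i
--             break
--         if(i == len(numData) - 1):
--             indexStop = len(numData)
--     return (indexStart, indexStop)
-- ===== SOURCE B (Python) =====
-- def findBiggestChunk(numData: list, findChunk: str):
--     # run-length decomposition: group the list into (value, length) runs,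
--     # then scan the runs with an offset counter
--     runs = []
--     j = 0
--     n = len(numData)
--     while j < n:
--         k = j
--         while k < n and numData[k] == numData[j]:
--             k += 1
--         runs.append((numData[j], k - j))
--         j = k
--     i = 0
--     for val, length in runs:
--         if val == findChunk:
--             return (i, i + length)
--         i += length
--     return (0, n)
-- ===== Notes on version B (the rewrite author's own statement) =====
-- stated objective: alternative
-- what changed: Replaces A's flag-driven single pass by a run-length-encoding decomposition: first group the list into (value, length) runs, then scan the runs with an accumulated offset, returning (offset, offset+length) for the first run keyed by findChunk and (0, len) if none.
import Mathlib
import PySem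

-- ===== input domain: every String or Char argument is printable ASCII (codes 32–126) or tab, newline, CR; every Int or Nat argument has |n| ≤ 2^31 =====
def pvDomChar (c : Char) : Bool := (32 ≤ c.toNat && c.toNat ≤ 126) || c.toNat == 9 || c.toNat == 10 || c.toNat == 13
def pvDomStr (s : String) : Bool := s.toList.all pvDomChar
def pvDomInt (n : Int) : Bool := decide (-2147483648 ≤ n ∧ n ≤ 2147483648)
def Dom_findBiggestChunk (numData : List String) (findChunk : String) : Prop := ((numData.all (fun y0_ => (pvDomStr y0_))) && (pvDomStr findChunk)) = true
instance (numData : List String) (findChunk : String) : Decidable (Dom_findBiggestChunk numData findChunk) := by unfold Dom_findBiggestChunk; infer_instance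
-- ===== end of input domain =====

-- B replaces A's flag-driven single pass by a run-length decomposition (group into (value, length) runs, then scan runs with an offset); same O(n) cost.


-- ===== PORT A =====
-- the for-loop with its break, as fuel-indexed recursion over the index i with the three
-- mutable variables (indexStart, indexStop, foundStart) as accumulators; the fuel only
-- makes the recursion structural (called with fuel = len, enough for all iterations)
def loopA (numData : List String) (findChunk : String) (fuel : Nat) (i : Nat)
    (indexStart indexStop : Int) (foundStart : Bool) : Int × Int :=
  match fuel with
  | 0 => (indexStart, indexStop)
  | fuel + 1 =>
    if h : i < numData.length then
      let hit := numData[i] = findChunk ∧ foundStart = false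
      let indexStart' := if hit then (i : Int) else indexStart
      let foundStart' := if hit then true else foundStart
      if numData[i] ≠ findChunk ∧ foundStart' = true then
        (indexStart', (i : Int))
      else
        let indexStop' := if i = numData.length - 1 then (numData.length : Int) else indexStop
        loopA numData findChunk fuel (i + 1) indexStart' indexStop' foundStart'
    else (indexStart, indexStop)

def findBiggestChunk (numData : List String) (findChunk : String) : Int × Int :=
  loopA numData findChunk numData.length 0 0 0 false

-- ===== PORT B =====
-- the inner while loop: advance k while numData[k] == v (fuel-indexed, called with fuel = len)
def runLen (numData : List String) (v : String) (fuel : Nat) (k : Nat) : Nat :=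
  match fuel with
  | 0 => k
  | fuel + 1 =>
    if h : k < numData.length then
      if numData[k] = v then runLen numData v fuel (k + 1) else k
    else k

-- the outer while loop: build the list of (value, length) runs starting at index j
def buildRuns (numData : List String) (fuel : Nat) (j : Nat) : List (String × Int) :=
  match fuel with
  | 0 => []
  | fuel + 1 =>
    if h : j < numData.length then
      let k := runLen numData (numData[j]) numData.length j
      (numData[j], (k : Int) - (j : Int)) :: buildRuns numData fuel k
    else []

-- the for-loop over the runs with the offset accumulator i
def selectRun (runs : List (String × Int)) (findChunk : String) (i : Int) : Option (Int × Int) :=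
  match runs with
  | [] => none
  | (v, l) :: rest =>
    if v = findChunk then some (i, i + l) else selectRun rest findChunk (i + l)

def findBiggestChunk_alt (numData : List String) (findChunk : String) : Int × Int :=
  match selectRun (buildRuns numData numData.length 0) findChunk 0 with
  | some p => p
  | none => (0, (numData.length : Int))

-- ===== PRECONDITION & SPEC =====
def Spec_findBiggestChunk (numData : List String) (findChunk : String) (out : Int × Int) : Prop := out = findBiggestChunk_alt numData findChunk
instance (numData : List String) (findChunk : String) (out : Int × Int) : Decidable (Spec_findBiggestChunk numData findChunk out) := by unfold Spec_findBiggestChunk; infer_instance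

-- ===== CLAIM (what is proved, stated in full; the proofs are below) =====
def Claim_equal_findBiggestChunk : Prop := ∀ (numData : List String) (findChunk : String), Dom_findBiggestChunk numData findChunk → Spec_findBiggestChunk numData findChunk (findBiggestChunk numData findChunk)

-- ===== LEMMAS AND PROOFS =====

theorem runLen_ge (numData : List String) (v : String) :
    ∀ fuel k, k ≤ runLen numData v fuel k := by
  intro fuel
  induction fuel with
  | zero => intro k; exact le_refl k
  | succ fuel IH =>
    intro k
    rw [runLen]
    split
    · split
      · exact le_trans (Nat.le_succ k) (IH (k + 1))
      · exact le_refl k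
    · exact le_refl k

theorem runLen_high (numData : List String) (v : String) :
    ∀ fuel k, numData.length ≤ k → runLen numData v fuel k = k := by
  intro fuel k hk
  cases fuel with
  | zero => rfl
  | succ fuel => rw [runLen, dif_neg (by omega)]

theorem runLen_fuel_eq (numData : List String) (v : String) :
    ∀ f1 f2 k, numData.length ≤ k + f1 → numData.length ≤ k + f2 →
      runLen numData v f1 k = runLen numData v f2 k := by
  intro f1
  induction f1 with
  | zero =>
    intro f2 k h1 h2
    rw [runLen_high numData v 0 k (by omega), runLen_high numData v f2 k (by omega)]
  | succ f1 IH =>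
    intro f2 k h1 h2
    cases f2 with
    | zero =>
      rw [runLen_high numData v (f1 + 1) k (by omega), runLen_high numData v 0 k (by omega)]
    | succ f2 =>
      rw [runLen, runLen]
      split
      · split
        · exact IH f2 (k + 1) (by omega) (by omega)
        · rfl
      · rfl

theorem runLen_eq_on (numData : List String) (v : String) :
    ∀ fuel k t, k ≤ t → t < runLen numData v fuel k → ∀ (ht : t < numData.length),
      numData[t] = v := by
  intro fuel
  induction fuel with
  | zero =>
    intro k t hkt hlt ht
    rw [runLen] at hlt
    omega
  | succ fuel IH =>
    intro k t hkt hlt ht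
    rw [runLen] at hlt
    split at hlt
    · split at hlt
      · rename_i hkv
        rcases Nat.eq_or_lt_of_le hkt with heq | hgt
        · subst heq; exact hkv
        · exact IH (k + 1) t hgt hlt ht
      · omega
    · omega

-- A's loop once the index has run off the end: it returns the accumulators unchanged
theorem loopA_out (numData : List String) (findChunk : String) :
    ∀ fuel i (s z : Int) (b : Bool), numData.length ≤ i →
      loopA numData findChunk fuel i s z b = (s, z) := by
  intro fuel i s z b hi
  cases fuel with
  | zero => rfl
  | succ fuel => rw [loopA, dif_neg (by omega)]

-- A = B when the chunk is found: once foundStart, A counts to the end of the run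
theorem loopA_found (numData : List String) (findChunk : String) :
    ∀ fuel i, numData.length ≤ i + fuel → i < numData.length → ∀ (s z : Int),
      loopA numData findChunk fuel i s z true =
        (s, (runLen numData findChunk fuel i : Int)) := by
  intro fuel
  induction fuel with
  | zero => intro i hfu hi; omega
  | succ fuel IH =>
    intro i hfu hi s z
    rw [loopA, runLen]
    simp only [hi, dif_pos]
    by_cases hx : numData[i] = findChunk
    · simp only [hx, if_pos]
      simp only [ne_eq, not_true_eq_false, false_and, Bool.true_eq_false, and_false, if_false]
      by_cases hend : i + 1 < numData.length
      · rw [IH (i + 1) (by omega) hend s]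
      · rw [if_pos (show i = numData.length - 1 by omega),
          loopA_out numData findChunk fuel (i + 1) s (numData.length : Int) true (by omega),
          runLen_high numData findChunk fuel (i + 1) (by omega)]
        have hlen : i + 1 = numData.length := by omega
        rw [hlen]
    · simp only [hx, Bool.true_eq_false, and_false, if_false, ne_eq, not_false_eq_true,
        true_and, if_pos]

-- A when the chunk does not occur from index i on
theorem loopA_absent (numData : List String) (findChunk : String) :
    ∀ fuel i, numData.length ≤ i + fuel → i < numData.length →
      findChunk ∉ numData.drop i → ∀ (z : Int),
      loopA numData findChunk fuel i 0 z false = (0, (numData.length : Int)) := by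
  intro fuel
  induction fuel with
  | zero => intro i hfu hi; omega
  | succ fuel IH =>
    intro i hfu hi hnm z
    have hx : numData[i] ≠ findChunk := by
      intro h
      apply hnm
      have h0 : 0 < (numData.drop i).length := by simp; omega
      have he : (numData.drop i)[0] = numData[i] := by simp
      rw [← h, ← he]
      exact List.getElem_mem h0
    rw [loopA]
    simp only [hi, dif_pos]
    simp only [hx, false_and, ne_eq, not_false_eq_true, Bool.false_eq_true, if_neg, and_false]
    by_cases hend : i + 1 < numData.length
    · have hnm' : findChunk ∉ numData.drop (i + 1) := by
        intro h
        exact hnm (by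
          have hd : numData.drop (i + 1) = (numData.drop i).drop 1 := by
            rw [List.drop_drop]
          exact (List.drop_subset 1 _) (hd ▸ h))
      rw [if_neg (show ¬ i = numData.length - 1 by omega)]
      exact IH (i + 1) (by omega) hend hnm' z
    · rw [if_pos (show i = numData.length - 1 by omega)]
      exact loopA_out numData findChunk fuel (i + 1) 0 (numData.length : Int) false (by omega)

-- A while still searching: up to the first occurrence nothing matches
theorem loopA_search (numData : List String) (findChunk : String)
    (hm : findChunk ∈ numData) :
    ∀ fuel i, numData.length ≤ i + fuel → i ≤ numData.idxOf findChunk → ∀ (z : Int),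
      loopA numData findChunk fuel i 0 z false =
        ((numData.idxOf findChunk : Int),
         (runLen numData findChunk numData.length (numData.idxOf findChunk) : Int)) := by
  have hs : numData.idxOf findChunk < numData.length := List.idxOf_lt_length_of_mem hm
  intro fuel
  induction fuel with
  | zero => intro i hfu hi; omega
  | succ fuel IH =>
    intro i hfu hi z
    have hilt : i < numData.length := by omega
    rcases Nat.eq_or_lt_of_le hi with hieq | hlt
    · have hx : numData[i]'hilt = findChunk := by
        simp only [hieq]; exact List.getElem_idxOf hs
      rw [loopA]
      simp only [hilt, dif_pos]
      simp only [hx, and_true, if_pos, ne_eq, not_true_eq_false, if_false]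
      have hr : runLen numData findChunk numData.length (numData.idxOf findChunk)
          = runLen numData findChunk (fuel + 1) i := by
        rw [hieq]
        exact runLen_fuel_eq numData findChunk numData.length (fuel + 1)
          (numData.idxOf findChunk) (by omega) (by omega)
      rw [hr, runLen]
      simp only [hilt, dif_pos, hx, if_pos]
      by_cases hend : i + 1 < numData.length
      · rw [loopA_found numData findChunk fuel (i + 1) (by omega) hend (i : Int) _, hieq]
      · rw [if_pos (show i = numData.length - 1 by omega),
          loopA_out numData findChunk fuel (i + 1) (i : Int) (numData.length : Int) true
            (by omega),
          runLen_high numData findChunk fuel (i + 1) (by omega), hieq,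
          show numData.idxOf findChunk + 1 = numData.length from by omega]
    · have hx : numData[i]'hilt ≠ findChunk := by
        have h := List.not_of_lt_findIdx (p := (· == findChunk)) (xs := numData) (i := i)
          (by simpa [List.idxOf] using hlt)
        simpa using h
      rw [loopA]
      simp only [hilt, dif_pos]
      simp only [hx, false_and, ne_eq, not_false_eq_true, Bool.false_eq_true, if_neg, and_false]
      rw [if_neg (show ¬ i = numData.length - 1 by omega)]
      exact IH (i + 1) (by omega) (by omega) z

-- B when the chunk does not occur from index j on: every run key differs, result none
theorem selectRun_absent (numData : List String) (findChunk : String) :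
    ∀ fuel j, findChunk ∉ numData.drop j → ∀ (i : Int),
      selectRun (buildRuns numData fuel j) findChunk i = none := by
  intro fuel
  induction fuel with
  | zero => intro j hnm i; rfl
  | succ fuel IH =>
    intro j hnm i
    by_cases hj : j < numData.length
    · have hx : numData[j] ≠ findChunk := by
        intro h
        apply hnm
        have h0 : 0 < (numData.drop j).length := by simp; omega
        have he : (numData.drop j)[0] = numData[j] := by simp
        rw [← h, ← he]
        exact List.getElem_mem h0
      rw [buildRuns, dif_pos hj]
      simp only [selectRun]
      rw [if_neg (fun h => hx h)]
      have hk : j ≤ runLen numData (numData[j]) numData.length j :=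
        runLen_ge numData (numData[j]) numData.length j
      have hnm' : findChunk ∉ numData.drop (runLen numData (numData[j]) numData.length j) := by
        intro h
        apply hnm
        have hd : numData.drop (runLen numData (numData[j]) numData.length j)
            = (numData.drop j).drop (runLen numData (numData[j]) numData.length j - j) := by
          rw [List.drop_drop]; congr 1; omega
        exact (List.drop_subset _ _) (hd ▸ h)
      exact IH (runLen numData (numData[j]) numData.length j) hnm' _
    · rw [buildRuns, dif_neg hj]
      rfl

-- inside a run the values all equal the run's key, so a run containing the first
-- occurrence must be keyed by it
theorem runLen_succ_gt (numData : List String) (v : String) :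
    ∀ fuel j, (hj : j < numData.length) → numData[j] = v →
      j < runLen numData v (fuel + 1) j := by
  intro fuel j hj hx
  rw [runLen, dif_pos hj, if_pos hx]
  exact Nat.lt_of_lt_of_le (Nat.lt_succ_self j) (runLen_ge numData v fuel (j + 1))

-- B while the chunk occurs at or after index j: the offset tracks j, the answer is the
-- run at the first occurrence
theorem selectRun_found (numData : List String) (findChunk : String)
    (hm : findChunk ∈ numData) :
    ∀ fuel j, numData.length ≤ j + fuel → j ≤ numData.idxOf findChunk →
      selectRun (buildRuns numData fuel j) findChunk (j : Int) =
        some ((numData.idxOf findChunk : Int),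
              (runLen numData findChunk numData.length (numData.idxOf findChunk) : Int)) := by
  have hs : numData.idxOf findChunk < numData.length := List.idxOf_lt_length_of_mem hm
  intro fuel
  induction fuel with
  | zero => intro j hfu hj; omega
  | succ fuel IH =>
    intro j hfu hj
    have hjl : j < numData.length := by omega
    rcases Nat.eq_or_lt_of_le hj with hjeq | hjlt
    · have hx : numData[j]'hjl = findChunk := by
        simp only [hjeq]; exact List.getElem_idxOf hs
      rw [buildRuns, dif_pos hjl]
      simp only [selectRun]
      rw [if_pos hx, hx, hjeq]
      congr 2
      ring
    · have hx : numData[j]'hjl ≠ findChunk := by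
        have h := List.not_of_lt_findIdx (p := (· == findChunk)) (xs := numData) (i := j)
          (by simpa [List.idxOf] using hjlt)
        simpa using h
      rw [buildRuns, dif_pos hjl]
      simp only [selectRun]
      rw [if_neg (fun h => hx h)]
      have hlen1 : numData.length - 1 + 1 = numData.length := by omega
      have hk1 : j + 1 ≤ runLen numData (numData[j]) numData.length j := by
        have := runLen_succ_gt numData (numData[j]) (numData.length - 1) j hjl rfl
        rw [hlen1] at this
        omega
      have hkle : runLen numData (numData[j]) numData.length j ≤ numData.idxOf findChunk := by
        by_contra hgt
        rw [not_le] at hgt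
        have := runLen_eq_on numData (numData[j]) numData.length j (numData.idxOf findChunk)
          (by omega) hgt hs
        exact hx (this ▸ List.getElem_idxOf hs)
      have harith : (j : Int) + ((runLen numData (numData[j]) numData.length j : Int) - (j : Int))
          = (runLen numData (numData[j]) numData.length j : Int) := by ring
      rw [harith]
      exact IH (runLen numData (numData[j]) numData.length j) (by omega) hkle

-- ===== VERDICT (by name: the statement is the Claim_ definition above) =====
theorem findBiggestChunk_spec : Claim_equal_findBiggestChunk := by
  intro numData findChunk _
  unfold Spec_findBiggestChunk findBiggestChunk findBiggestChunk_alt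
  by_cases hm : findChunk ∈ numData
  · have hB := selectRun_found numData findChunk hm numData.length 0 (by omega) (Nat.zero_le _)
    simp only [Nat.cast_zero] at hB
    rw [hB]
    exact loopA_search numData findChunk hm numData.length 0 (by omega) (Nat.zero_le _) 0
  · rw [selectRun_absent numData findChunk numData.length 0 (by simpa using hm) 0]
    rcases Nat.eq_zero_or_pos numData.length with h0 | hpos
    · rw [h0]; rfl
    · exact loopA_absent numData findChunk numData.length 0 (by omega) hpos
        (by simpa using hm) 0
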